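-- pv_equiv track=rewrite | github.com/theexperiencecompany/gaia | apps/api/app/utils/notion_md.py | _add_tab_space
-- ===== SOURCE A (Python) =====
-- def _add_tab_space(text: str, n: int = 0) -> str:
--     if n <= 0:
--         return text
--
--     tab = "\t"
--     if "\n" in text:
--         lines = text.split("\n")
--         return "\n".join(f"{tab * n}{line}" for line in lines)
--     return f"{tab * n}{text}"
-- ===== SOURCE B (Python) =====
-- def _add_tab_space(text: str, n: int = 0) -> str:
--     if n <= 0:
--         return text
--     out = []
--     at_line_start = True
--     for ch in text:
--         if at_line_start:
--             out.append("\t" * n)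
--         out.append(ch)
--         at_line_start = ch == "\n"
--     if at_line_start:
--         out.append("\t" * n)
--     return "".join(out)
-- ===== Notes on version B (the rewrite author's own statement) =====
-- stated objective: alternative
-- what changed: Replaces the split-into-lines / per-line f-string / join pipeline (and its separate no-newline branch) with a single character-level scan: a state machine that tracks whether it is at a line start and emits the tab prefix there, building the output in one pass with an accumulator.
import Mathlib
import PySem

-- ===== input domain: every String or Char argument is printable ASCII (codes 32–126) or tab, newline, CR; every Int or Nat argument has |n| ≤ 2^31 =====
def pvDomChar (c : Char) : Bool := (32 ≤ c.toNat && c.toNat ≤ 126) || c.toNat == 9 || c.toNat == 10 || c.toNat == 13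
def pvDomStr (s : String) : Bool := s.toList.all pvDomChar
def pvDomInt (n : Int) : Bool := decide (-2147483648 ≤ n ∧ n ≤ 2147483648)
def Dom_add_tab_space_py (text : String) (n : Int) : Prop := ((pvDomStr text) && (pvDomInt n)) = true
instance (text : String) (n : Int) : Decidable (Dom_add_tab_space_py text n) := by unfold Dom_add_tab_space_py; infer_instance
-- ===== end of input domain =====

-- B replaces A's split-into-lines / per-line prefix / join pipeline by a single
-- character-level scan with a line-start flag that emits the tab prefix at each line start.

-- ===== PORT A =====
def add_tab_space_py (text : String) (n : Int) : String :=
  if n ≤ 0 then text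
  else
    let tab : List Char := ['\t']
    if PySem.Chars.isIn ['\n'] text.toList then
      -- text.split("\n") with the literal non-empty separator "\n"
      let lines : List (List Char) := PySem.Chars.splitOn text.toList ['\n']
      String.ofList (PySem.Chars.join ['\n'] (lines.map (fun line => PySem.List.pyRepeat tab n ++ line)))
    else String.ofList (PySem.List.pyRepeat tab n ++ text.toList)

-- ===== PORT B =====
-- single pass: state = (output so far, at_line_start flag); final flush if still at a line start
def add_tab_space_py_alt (text : String) (n : Int) : String :=
  if n ≤ 0 then text
  else
    let pre : List Char := PySem.List.pyRepeat ['\t'] n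
    let st : List Char × Bool :=
      text.toList.foldl
        (fun (s : List Char × Bool) ch =>
          ((if s.2 then s.1 ++ pre else s.1) ++ [ch], ch == '\n'))
        ([], true)
    String.ofList (if st.2 then st.1 ++ pre else st.1)

-- ===== PRECONDITION & SPEC =====
def Spec_add_tab_space_py (text : String) (n : Int) (out : String) : Prop := out = add_tab_space_py_alt text n
instance (text : String) (n : Int) (out : String) : Decidable (Spec_add_tab_space_py text n out) := by unfold Spec_add_tab_space_py; infer_instance

-- ===== CLAIM (what is proved, stated in full; the proofs are below) =====
def Claim_equal_add_tab_space_py : Prop := ∀ (text : String) (n : Int), Dom_add_tab_space_py text n → Spec_add_tab_space_py text n (add_tab_space_py text n)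

-- ===== LEMMAS AND PROOFS =====

/-- What Python's `text.replace("\n", nw)` computes, structurally (used as the common middle form). -/
def repSpec (nw : List Char) : List Char → List Char
  | [] => []
  | c :: t => (if c = '\n' then nw else [c]) ++ repSpec nw t

/-- What `splitOn l ['\n']` computes, structurally. -/
def spSpec : List Char → List (List Char)
  | [] => [[]]
  | c :: t => if c = '\n' then [] :: spSpec t else List.modifyHead (c :: ·) (spSpec t)

/-- B's state machine, structurally: remaining input and line-start flag. -/
def bSpec (pre : List Char) : List Char → Bool → List Char
  | [], b => if b then pre else []
  | c :: t, b => (if b then pre else []) ++ [c] ++ bSpec pre t (c == '\n')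

theorem inter_cons_cons (s x y : List Char) (ys : List (List Char)) :
    s.intercalate (x :: y :: ys) = x ++ s ++ s.intercalate (y :: ys) := by
  simp [List.intercalate, List.intersperse]

theorem splitOn_go_eq :
    ∀ (l : List Char) (fuel : Nat) (cur : List Char) (accs : List (List Char)),
      l.length ≤ fuel →
      PySem.Chars.splitOn.go ['\n'] fuel l cur accs = accs.reverse ++ List.modifyHead (cur.reverse ++ ·) (spSpec l) := by
  intro l
  induction l with
  | nil =>
    intro fuel cur accs _
    cases fuel <;> simp [PySem.Chars.splitOn.go, spSpec]
  | cons c t ih =>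
    intro fuel cur accs hf
    cases fuel with
    | zero => simp at hf
    | succ f =>
      by_cases hc : c = '\n'
      · subst hc
        simp only [PySem.Chars.splitOn.go]
        rw [if_pos (by simp)]
        have hd : List.drop ['\n'].length ('\n' :: t) = t := rfl
        rw [hd, ih f [] (cur.reverse :: accs) (by simpa using hf)]
        cases h : spSpec t <;> simp [spSpec, h]
      · simp only [PySem.Chars.splitOn.go]
        rw [if_neg (by simp [List.isPrefixOf]; exact fun h => hc h.symm),
            ih f (c :: cur) accs (by simpa using hf)]
        cases h : spSpec t with
        | nil => simp [spSpec, hc, h]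
        | cons p ps => simp [spSpec, hc, h]

theorem splitOn_eq_spSpec (l : List Char) :
    PySem.Chars.splitOn l ['\n'] = spSpec l := by
  simp only [PySem.Chars.splitOn]
  rw [splitOn_go_eq l (l.length + 1) [] [] (by omega)]
  cases h : spSpec l <;> simp

theorem spSpec_ne_nil (l : List Char) : spSpec l ≠ [] := by
  induction l with
  | nil => simp [spSpec]
  | cons c t ih =>
    simp only [spSpec]
    split
    · simp
    · cases h : spSpec t with
      | nil => exact absurd h ih
      | cons p ps => simp

theorem inter_single (s x : List Char) : s.intercalate [x] = x := by
  simp [List.intercalate, List.intersperse]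

/-- A's joined prefixed pieces equal prefix ++ newline substitution. -/
theorem join_map_spSpec (l : List Char) (pre : List Char) :
    PySem.Chars.join ['\n'] ((spSpec l).map (fun p => pre ++ p)) =
      pre ++ repSpec ('\n' :: pre) l := by
  induction l generalizing pre with
  | nil =>
    simp only [spSpec, repSpec, List.map_cons, List.map_nil, PySem.Chars.join]
    rw [inter_single]
  | cons c t ih =>
    obtain ⟨p, ps, hp⟩ := List.exists_cons_of_ne_nil (spSpec_ne_nil t)
    have iht := ih pre
    rw [hp] at iht
    simp only [List.map_cons, PySem.Chars.join] at iht
    by_cases hc : c = '\n'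
    · subst hc
      rw [show spSpec ('\n' :: t) = [] :: spSpec t from by simp [spSpec], hp]
      simp only [List.map_cons, PySem.Chars.join]
      rw [inter_cons_cons, iht]
      simp [repSpec]
    · rw [show spSpec (c :: t) = List.modifyHead (c :: ·) (spSpec t) from by simp [spSpec, hc], hp]
      simp only [List.modifyHead, List.map_cons, PySem.Chars.join]
      cases ps with
      | nil =>
        simp only [List.map_nil] at iht ⊢
        rw [inter_single]
        rw [inter_single] at iht
        have hp' : p = repSpec ('\n' :: pre) t := List.append_cancel_left iht
        simp only [repSpec, if_neg hc]
        rw [← hp']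
        simp
      | cons q qs =>
        simp only [List.map_cons] at iht ⊢
        rw [inter_cons_cons] at iht
        rw [inter_cons_cons]
        have hp' : p ++ (['\n'] ++ List.intercalate ['\n'] ((pre ++ q) :: qs.map (fun p => pre ++ p))) =
            repSpec ('\n' :: pre) t := by
          apply List.append_cancel_left (as := pre)
          rw [← iht]
          simp
        simp only [repSpec, if_neg hc]
        rw [← hp']
        simp

theorem repSpec_of_not_mem (l nw : List Char) (h : '\n' ∉ l) : repSpec nw l = l := by
  induction l with
  | nil => rfl
  | cons c t ih =>
    simp only [List.mem_cons, not_or] at h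
    simp [repSpec, Ne.symm h.1, ih h.2]

/-- B's foldl accumulates on top of any prefix: it computes `bSpec`. -/
theorem foldl_eq_bSpec (pre : List Char) :
    ∀ (l acc : List Char) (b : Bool),
      (let st := l.foldl
        (fun (s : List Char × Bool) ch =>
          ((if s.2 then s.1 ++ pre else s.1) ++ [ch], ch == '\n')) (acc, b)
       if st.2 then st.1 ++ pre else st.1) = acc ++ bSpec pre l b := by
  intro l
  induction l with
  | nil => intro acc b; cases b <;> simp [bSpec]
  | cons c t ih =>
    intro acc b
    simp only [List.foldl_cons]
    rw [ih ((if b then acc ++ pre else acc) ++ [c]) (c == '\n')]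
    cases b <;> simp [bSpec]

/-- With flag false, the state machine is the newline substitution. -/
theorem bSpec_false_eq_repSpec (pre : List Char) (l : List Char) :
    bSpec pre l false = repSpec ('\n' :: pre) l := by
  induction l with
  | nil => rfl
  | cons c t ih =>
    by_cases hc : c = '\n'
    · subst hc
      have htrue : bSpec pre t true = pre ++ bSpec pre t false := by
        cases t <;> simp [bSpec]
      simp [bSpec, repSpec, htrue, ih]
    · simp only [bSpec, repSpec, if_neg hc, show (c == '\n') = false from by simp [hc],
        Bool.false_eq_true, if_false, ih]
      simp

theorem bSpec_true_eq (pre : List Char) (l : List Char) :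
    bSpec pre l true = pre ++ repSpec ('\n' :: pre) l := by
  rw [← bSpec_false_eq_repSpec]
  cases l <;> simp [bSpec]

-- ===== VERDICT (by name: the statement is the Claim_ definition above) =====
theorem add_tab_space_py_spec : Claim_equal_add_tab_space_py := by
  intro text n _
  unfold Spec_add_tab_space_py add_tab_space_py add_tab_space_py_alt
  by_cases hn : n ≤ 0
  · simp [hn]
  · simp only [if_neg hn]
    have hB := foldl_eq_bSpec (PySem.List.pyRepeat ['\t'] n) text.toList [] true
    simp only [] at hB
    by_cases hin : PySem.Chars.isIn ['\n'] text.toList = true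
    · simp only [hin, if_pos]
      rw [splitOn_eq_spSpec]
      refine congrArg String.ofList ?_
      rw [join_map_spSpec, hB, bSpec_true_eq]
      simp
    · simp only [Bool.not_eq_true] at hin
      simp only [hin, Bool.false_eq_true, if_false]
      refine congrArg String.ofList ?_
      rw [hB, bSpec_true_eq, repSpec_of_not_mem]
      · simp
      · intro hmem
        rw [PySem.Chars.isIn_eq_false_iff] at hin
        obtain ⟨s1, s2, hsplit⟩ := List.append_of_mem hmem
        exact hin ⟨s1, s2, by simp [hsplit]⟩
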